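-- pv_equiv track=rewrite | github.com/jiu6525/baekjoon | 백준/Silver/1652. 누울 자리를 찾아라/누울 자리를 찾아라.py | ck
-- ===== SOURCE A (Python) =====
-- def ck(arr):
--     ans = 0
--     for i in arr:
--         c = 0
--         for j in i:
--             if j == ".":
--                 c += 1
--             else:
--                 if c >= 2:
--                     ans += 1
--                 c = 0
--         if c>=2:
--             ans += 1
--     return ans
-- ===== SOURCE B (Python) =====
-- def ck(arr):
--     return sum(
--         1
--         for row in arr
--         for prev, a, b in zip(["x"] + list(row), row, row[1:])
--         if a == "." and b == "." and prev != "."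
--     )
-- ===== Notes on version B (the rewrite author's own statement) =====
-- stated objective: idiomatic
-- what changed: A's per-character counter with end-of-run/end-of-row flush is replaced by a single comprehension that zips each row with its shifted copies and counts adjacent dot pairs that start a run (prev non-dot).
import Mathlib
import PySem

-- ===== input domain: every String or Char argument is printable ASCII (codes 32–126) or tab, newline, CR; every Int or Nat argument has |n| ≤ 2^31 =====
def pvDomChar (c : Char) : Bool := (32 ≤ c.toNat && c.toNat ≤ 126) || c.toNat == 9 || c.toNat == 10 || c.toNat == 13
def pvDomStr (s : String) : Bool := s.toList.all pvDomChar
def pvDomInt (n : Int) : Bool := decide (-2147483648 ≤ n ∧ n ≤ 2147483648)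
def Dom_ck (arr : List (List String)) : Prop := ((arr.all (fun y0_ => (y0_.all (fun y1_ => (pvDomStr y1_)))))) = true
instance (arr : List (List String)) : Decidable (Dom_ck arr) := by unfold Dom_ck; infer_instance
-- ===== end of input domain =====

-- B replaces A's per-character counter-and-flush loop by counting, over zipped
-- (prev, a, b) triples, the adjacent dot pairs that start a run (objective: idiomatic; same cost).

-- ===== PORT A =====
def ck (arr : List (List String)) : Int :=
  arr.foldl (fun ans i =>
    let p := i.foldl (fun (p : Int × Int) j =>
      if j == "." then (p.1, p.2 + 1)
      else (if 2 ≤ p.2 then p.1 + 1 else p.1, 0)) (ans, 0)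
    if 2 ≤ p.2 then p.1 + 1 else p.1) 0

-- ===== PORT B =====
def ck_alt (arr : List (List String)) : Int :=
  arr.foldl (fun total row =>
    total + (((("x" :: row).zip (row.zip (row.drop 1))).countP
      (fun t => t.2.1 == "." && t.2.2 == "." && !(t.1 == "."))) : Int)) 0

-- ===== PRECONDITION & SPEC =====
def Spec_ck (arr : List (List String)) (out : Int) : Prop := out = ck_alt arr
instance (arr : List (List String)) (out : Int) : Decidable (Spec_ck arr out) := by unfold Spec_ck; infer_instance

-- ===== CLAIM (what is proved, stated in full; the proofs are below) =====
def Claim_equal_ck : Prop := ∀ (arr : List (List String)), Dom_ck arr → Spec_ck arr (ck arr)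

-- ===== LEMMAS AND PROOFS =====

-- reference run-start count used only by the proofs
def pvCnt : String → List String → Nat
  | prev, a :: b :: t => (if a == "." && b == "." && !(prev == ".") then 1 else 0) + pvCnt a (b :: t)
  | _, _ => 0

-- A's inner step
def pvStep (p : Int × Int) (j : String) : Int × Int :=
  if j == "." then (p.1, p.2 + 1) else (if 2 ≤ p.2 then p.1 + 1 else p.1, 0)

lemma pvCnt_indep (prev : String) (h : (prev == ".") = false) (l : List String) :
    pvCnt prev l = pvCnt "x" l := by
  cases l with
  | nil => rfl
  | cons a t =>
    cases t with
    | nil => rfl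
    | cons b t' => simp [pvCnt, h]

lemma pv_row_eq : ∀ (row : List String) (ans c : Int), 0 ≤ c →
    (if 2 ≤ (row.foldl pvStep (ans, c)).2 then (row.foldl pvStep (ans, c)).1 + 1
     else (row.foldl pvStep (ans, c)).1)
    = ans + (if 2 ≤ c ∨ (c = 1 ∧ row.head? = some ".") then 1 else 0)
        + (pvCnt (if 1 ≤ c then "." else "x") row : Int) := by
  intro row
  induction row with
  | nil =>
    intro ans c hc
    simp only [List.foldl_nil, List.head?_nil, pvCnt, reduceCtorEq, and_false, or_false,
      Nat.cast_zero, add_zero]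
    split_ifs <;> omega
  | cons j t ih =>
    intro ans c hc
    by_cases hj : j = "."
    · subst hj
      have hstep : pvStep (ans, c) "." = (ans, c + 1) := by simp [pvStep]
      rw [List.foldl_cons, hstep, ih ans (c + 1) (by omega)]
      have h1 : (1:Int) ≤ c + 1 := by omega
      cases t with
      | nil =>
        simp only [List.head?_nil, List.head?_cons, pvCnt, if_pos h1]
        (try split_ifs) <;> (try simp_all) <;> omega
      | cons b t' =>
        simp only [List.head?_cons, pvCnt, if_pos h1]
        by_cases hc1 : (1:Int) ≤ c
        · by_cases hb : b = "." <;> (try simp [hb, hc1]) <;>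
            (try split_ifs) <;> (try simp_all) <;> omega
        · have hc0 : c = 0 := by omega
          subst hc0
          by_cases hb : b = "." <;> (try simp [hb]) <;>
            (try split_ifs) <;> (try simp_all) <;> omega
    · have hjb : (j == ".") = false := by simp [hj]
      have hstep : pvStep (ans, c) j = ((if 2 ≤ c then ans + 1 else ans), 0) := by
        simp [pvStep, hjb]
      rw [List.foldl_cons, hstep, ih _ 0 (by omega)]
      have hcnt : pvCnt (if (1:Int) ≤ c then "." else "x") (j :: t) = pvCnt "x" t := by
        cases t with
        | nil => split_ifs <;> rfl
        | cons b t' =>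
          split_ifs <;> simp only [pvCnt, hjb, Bool.not_false, Bool.and_true] <;>
            (try simp) <;> exact pvCnt_indep j hjb (b :: t')
      rw [hcnt]
      simp only [List.head?_cons, pvCnt]
      have hne : ¬ (some j = some ".") := by simp [hj]
      (try split_ifs) <;> (try simp_all) <;> omega

lemma pv_zip_cnt : ∀ (row : List String) (prev : String),
    ((prev :: row).zip (row.zip (row.drop 1))).countP
      (fun t => t.2.1 == "." && t.2.2 == "." && !(t.1 == ".")) = pvCnt prev row := by
  intro row
  induction row with
  | nil => intro prev; rfl
  | cons a t ih =>
    intro prev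
    cases t with
    | nil => rfl
    | cons b t' =>
      simp only [List.drop_succ_cons, List.drop_zero, List.zip_cons_cons,
        List.countP_cons, pvCnt]
      rw [← ih a]
      simp only [List.drop_succ_cons, List.drop_zero, List.zip_cons_cons, List.countP_cons]
      split_ifs <;> simp_all <;> omega

-- ===== VERDICT (by name: the statement is the Claim_ definition above) =====
theorem ck_spec : Claim_equal_ck := by
  unfold Claim_equal_ck
  intro arr _
  unfold Spec_ck ck ck_alt
  apply PySem.List.foldl_congr_mem
  intro acc row _
  have hrow := pv_row_eq row acc 0 (le_refl 0)
  norm_num at hrow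
  rw [pv_zip_cnt row "x"]
  show (if 2 ≤ (row.foldl pvStep (acc, 0)).2 then (row.foldl pvStep (acc, 0)).1 + 1
        else (row.foldl pvStep (acc, 0)).1) = acc + (pvCnt "x" row : Int)
  exact hrow
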